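-- pv_equiv track=rewrite | github.com/weirdtangent/pulse-os | pulse/datetime_utils.py | _extract_time_phrase
-- ===== SOURCE A (Python) =====
-- _TIME_PHRASE_STOP_WORDS = (
--     ",",
--     " every ",
--     " each ",
--     " repeating ",
--     " repeat ",
--     " starting ",
--     " start ",
--     " beginning ",
--     " for ",
--     " during ",
--     " over ",
--     " to ",
--     " so ",
--     " then ",
--     " that ",
-- )
--
-- def _extract_time_phrase(text: str) -> str:  # noqa: PLR0911
--     """Extract time phrase from text, removing prefixes and stop words."""
--     trimmed = text.strip(" ,")
--     if not trimmed:
--         return ""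
--     lowered = trimmed.lower()
--     for prefix in ("at ", "around ", "by ", "about "):
--         if lowered.startswith(prefix):
--             trimmed = trimmed[len(prefix) :].lstrip(" ,")
--             lowered = trimmed.lower()
--             break
--     stop_positions = [lowered.find(token) for token in _TIME_PHRASE_STOP_WORDS if lowered.find(token) != -1]
--     if stop_positions:
--         stop_index = min(stop_positions)
--         trimmed = trimmed[:stop_index]
--     return trimmed.strip(" ,")
-- ===== SOURCE B (Python) =====
-- _TIME_PHRASE_STOP_WORDS = (
--     ",",
--     " every ",
--     " each ",
--     " repeating ",
--     " repeat ",
--     " starting ",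
--     " start ",
--     " beginning ",
--     " for ",
--     " during ",
--     " over ",
--     " to ",
--     " so ",
--     " then ",
--     " that ",
-- )
--
-- _PREFIXES = ("at ", "around ", "by ", "about ")
--
--
-- def _extract_time_phrase(text: str) -> str:
--     """Extract time phrase from text, removing prefixes and stop words."""
--     trimmed = text.strip(" ,")
--     if not trimmed:
--         return ""
--     lowered = trimmed.lower()
--     prefix = next((p for p in _PREFIXES if lowered.startswith(p)), None)
--     if prefix is not None:
--         trimmed = trimmed[len(prefix):].lstrip(" ,")
--         lowered = trimmed.lower()
--     # single left-to-right scan: cut at the first position where any stop word starts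
--     cut = next((i for i in range(len(lowered))
--                 if any(lowered.startswith(w, i) for w in _TIME_PHRASE_STOP_WORDS)), None)
--     if cut is not None:
--         trimmed = trimmed[:cut]
--     return trimmed.strip(" ,")
-- ===== Notes on version B (the rewrite author's own statement) =====
-- stated objective: alternative
-- what changed: Replaced the per-stop-word find() passes plus min() with a single left-to-right scan that cuts at the first position where any stop word starts, and replaced the break-style prefix loop with a next()-based first-match lookup.
import Mathlib
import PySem

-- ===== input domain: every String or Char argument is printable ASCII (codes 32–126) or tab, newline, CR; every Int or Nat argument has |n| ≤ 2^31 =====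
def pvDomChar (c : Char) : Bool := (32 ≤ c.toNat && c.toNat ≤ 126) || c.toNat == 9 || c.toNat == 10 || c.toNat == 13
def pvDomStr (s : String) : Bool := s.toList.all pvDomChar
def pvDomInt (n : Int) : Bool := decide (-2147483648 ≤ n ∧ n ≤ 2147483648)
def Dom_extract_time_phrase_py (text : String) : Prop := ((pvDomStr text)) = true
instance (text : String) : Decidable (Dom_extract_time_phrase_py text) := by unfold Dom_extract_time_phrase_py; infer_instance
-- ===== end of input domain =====

-- B replaces A's per-token find()+min() search by a single left-to-right scan that cuts at the
-- first position where any stop word starts (objective: alternative, one scan instead of k finds).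

-- shared module constants (_TIME_PHRASE_STOP_WORDS and the strip/prefix literals)
def pvStop : List (List Char) :=
  [",".toList, " every ".toList, " each ".toList, " repeating ".toList, " repeat ".toList,
   " starting ".toList, " start ".toList, " beginning ".toList, " for ".toList,
   " during ".toList, " over ".toList, " to ".toList, " so ".toList, " then ".toList,
   " that ".toList]

def pvChars : List Char := [' ', ',']

def pvPrefixes : List (List Char) := ["at ".toList, "around ".toList, "by ".toList, "about ".toList]

-- ===== PORT A =====
-- A's 'for prefix in …: if lowered.startswith(prefix): …; break' loop, carrying (trimmed, lowered).
-- 'trimmed[len(prefix):].lstrip(" ,")' is exact as drop + dropWhile-membership.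
def pvA_prefixLoop : List (List Char) → List Char × List Char → List Char × List Char
  | [], st => st
  | p :: rest, (trimmed, lowered) =>
    if PySem.Chars.startswith lowered p then
      let t := List.dropWhile (fun c => pvChars.contains c) (trimmed.drop p.length)
      (t, PySem.Chars.lower t)
    else pvA_prefixLoop rest (trimmed, lowered)

def extract_time_phrase_py (text : String) : String :=
  let trimmed := PySem.Chars.stripChars text.toList pvChars
  if trimmed = [] then ""
  else
    let lowered := PySem.Chars.lower trimmed
    let st := pvA_prefixLoop pvPrefixes (trimmed, lowered)
    let trimmed := st.1
    let lowered := st.2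
    let stop_positions :=
      (pvStop.filter (fun tok => PySem.Chars.find lowered tok ≠ -1)).map
        (fun tok => PySem.Chars.find lowered tok)
    let trimmed :=
      match PySem.List.min? stop_positions (fun x => x) with
      | some idx => PySem.List.slice trimmed none (some idx)   -- trimmed[:stop_index]
      | none => trimmed
    String.ofList (PySem.Chars.stripChars trimmed pvChars)

-- ===== PORT B =====
def extract_time_phrase_py_alt (text : String) : String :=
  let trimmed := PySem.Chars.stripChars text.toList pvChars
  if trimmed = [] then ""
  else
    let lowered := PySem.Chars.lower trimmed
    -- prefix = next((p for p in _PREFIXES if lowered.startswith(p)), None)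
    let st :=
      match pvPrefixes.find? (fun p => PySem.Chars.startswith lowered p) with
      | some p =>
        let t := List.dropWhile (fun c => pvChars.contains c) (trimmed.drop p.length)
        (t, PySem.Chars.lower t)
      | none => (trimmed, lowered)
    let trimmed := st.1
    let lowered := st.2
    -- cut = next((i for i in range(len(lowered)) if any(lowered.startswith(w, i) …)), None)
    -- 'lowered.startswith(w, i)' with 0 ≤ i ≤ len is exactly w <+: lowered.drop i.
    let trimmed :=
      match (List.range lowered.length).find?
          (fun i => pvStop.any (fun w => PySem.Chars.startswith (lowered.drop i) w)) with
      | some i => trimmed.take i        -- trimmed[:cut], cut a Nat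
      | none => trimmed
    String.ofList (PySem.Chars.stripChars trimmed pvChars)

-- ===== PRECONDITION & SPEC =====
def Spec_extract_time_phrase_py (text : String) (out : String) : Prop := out = extract_time_phrase_py_alt text
instance (text : String) (out : String) : Decidable (Spec_extract_time_phrase_py text out) := by unfold Spec_extract_time_phrase_py; infer_instance

-- ===== CLAIM (what is proved, stated in full; the proofs are below) =====
def Claim_equal_extract_time_phrase_py : Prop := ∀ (text : String), Dom_extract_time_phrase_py text → Spec_extract_time_phrase_py text (extract_time_phrase_py text)

-- ===== LEMMAS AND PROOFS =====

-- A's prefix loop computes exactly B's find?-based dispatch.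
theorem pvA_prefixLoop_eq (ps : List (List Char)) (t l : List Char) :
    pvA_prefixLoop ps (t, l) =
      match ps.find? (fun p => PySem.Chars.startswith l p) with
      | some p =>
        let t' := List.dropWhile (fun c => pvChars.contains c) (t.drop p.length)
        (t', PySem.Chars.lower t')
      | none => (t, l) := by
  induction ps with
  | nil => rfl
  | cons p rest ih =>
    by_cases h : PySem.Chars.startswith l p = true
    · simp [pvA_prefixLoop, List.find?, h]
    · simp only [Bool.not_eq_true] at h
      simp [pvA_prefixLoop, List.find?, h, ih]

theorem pvStop_ne_nil : ∀ w ∈ pvStop, w ≠ [] := by decide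

theorem find?_range_eq_some {p : Nat → Bool} {n i : Nat}
    (h1 : i < n) (h2 : p i = true) (h3 : ∀ j < i, p j = false) :
    (List.range n).find? p = some i := by
  rw [List.find?_eq_some_iff_getElem]
  refine ⟨h2, i, by simpa using h1, List.getElem_range _, ?_⟩
  intro j hj
  simp [List.getElem_range, h3 j hj]

-- the core equivalence: min over the tokens' first occurrences = first position where any token starts
theorem stop_cut_eq (L t : List Char) :
    (match PySem.List.min?
        ((pvStop.filter (fun tok => PySem.Chars.find L tok ≠ -1)).map
          (fun tok => PySem.Chars.find L tok)) (fun x => x) with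
      | some idx => PySem.List.slice t none (some idx)
      | none => t) =
    (match (List.range L.length).find?
        (fun i => pvStop.any (fun w => PySem.Chars.startswith (L.drop i) w)) with
      | some i => t.take i
      | none => t) := by
  set xs := (pvStop.filter (fun tok => PySem.Chars.find L tok ≠ -1)).map
      (fun tok => PySem.Chars.find L tok) with hxs
  cases hmin : PySem.List.min? xs (fun x => x) with
  | none =>
    -- no token occurs in L at all
    have hnil : xs = [] := (PySem.List.min?_eq_none_iff xs _).mp hmin
    have hno : ∀ w ∈ pvStop, ¬ w <:+: L := by
      intro w hw hinf
      have hfind : PySem.Chars.find L w ≠ -1 := (PySem.Chars.find_ne_neg_one_iff L w).mpr hinf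
      have : PySem.Chars.find L w ∈ xs := by
        rw [hxs]
        exact List.mem_map_of_mem (List.mem_filter.mpr ⟨hw, by simpa using hfind⟩)
      simp [hnil] at this
    have : (List.range L.length).find?
        (fun i => pvStop.any (fun w => PySem.Chars.startswith (L.drop i) w)) = none := by
      rw [List.find?_eq_none]
      intro i _
      simp only [List.any_eq_true, not_exists, Bool.not_eq_true, not_and]
      intro w hw
      by_contra hsw
      have hpre : w <+: L.drop i := (PySem.Chars.startswith_iff _ _).mp (by simpa using hsw)
      exact hno w hw (hpre.isInfix.trans (List.drop_suffix i L).isInfix)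
    simp [this]
  | some m =>
    have hmem := PySem.List.min?_mem hmin
    have hmin' := PySem.List.min?_isMin hmin
    rw [hxs] at hmem
    obtain ⟨w₀, hw₀mem, hw₀⟩ := List.mem_map.mp hmem
    have hw₀stop : w₀ ∈ pvStop := (List.mem_filter.mp hw₀mem).1
    have hw₀find : PySem.Chars.find L w₀ ≠ -1 := by
      have := (List.mem_filter.mp hw₀mem).2; simpa using this
    have hw₀inf : w₀ <:+: L := (PySem.Chars.find_ne_neg_one_iff L w₀).mp hw₀find
    have hm0 : 0 ≤ m := hw₀ ▸ (PySem.Chars.find_nonneg_iff L w₀).mpr hw₀inf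
    obtain ⟨hpre, hleast⟩ := PySem.Chars.find_spec (s := L) (sub := w₀) (hw₀ ▸ hm0)
    -- m.toNat is a position where w₀ starts
    have hlt : m.toNat < L.length := by
      have hne : w₀ ≠ [] := pvStop_ne_nil w₀ hw₀stop
      have hdropne : L.drop m.toNat ≠ [] := by
        intro hd
        rw [hw₀, hd] at hpre
        exact hne (List.prefix_nil.mp hpre)
      have := List.drop_eq_nil_iff.not.mp hdropne
      omega
    have hfound : (List.range L.length).find?
        (fun i => pvStop.any (fun w => PySem.Chars.startswith (L.drop i) w)) = some m.toNat := by
      apply find?_range_eq_some hlt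
      · simp only [List.any_eq_true]
        exact ⟨w₀, hw₀stop, (PySem.Chars.startswith_iff _ _).mpr (hw₀ ▸ hpre)⟩
      · intro j hj
        simp only [List.any_eq_false]
        intro w hw
        by_contra hsw
        have hsw' : PySem.Chars.startswith (L.drop j) w = true := by
          revert hsw; cases PySem.Chars.startswith (L.drop j) w <;> simp
        have hpw : w <+: L.drop j := (PySem.Chars.startswith_iff _ _).mp hsw'
        have hwinf : w <:+: L := hpw.isInfix.trans (List.drop_suffix j L).isInfix
        have hwfind : PySem.Chars.find L w ≠ -1 := (PySem.Chars.find_ne_neg_one_iff L w).mpr hwinf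
        have hwxs : PySem.Chars.find L w ∈ xs := by
          rw [hxs]
          exact List.mem_map_of_mem (List.mem_filter.mpr ⟨hw, by simpa using hwfind⟩)
        have hmle : m ≤ PySem.Chars.find L w := hmin' _ hwxs
        obtain ⟨_, hwleast⟩ := PySem.Chars.find_spec (s := L) (sub := w)
          ((PySem.Chars.find_nonneg_iff L w).mpr hwinf)
        exact hwleast j (by omega) hpw
    rw [hfound]
    simpa using PySem.List.slice_to t hm0

-- ===== VERDICT (by name: the statement is the Claim_ definition above) =====
theorem extract_time_phrase_py_spec : Claim_equal_extract_time_phrase_py := by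
  intro text _
  unfold Spec_extract_time_phrase_py extract_time_phrase_py extract_time_phrase_py_alt
  by_cases h : PySem.Chars.stripChars text.toList pvChars = []
  · simp [h]
  · simp only [h, pvA_prefixLoop_eq]
    rw [stop_cut_eq]
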